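-- pv_equiv track=rewrite | github.com/cemde/CopySyntax | copy_syntax/sequence.py | _str_sequence
-- ===== SOURCE A (Python) =====
-- from typing import Any, List, Union
-- import string
--
-- def _letter_pool(i: int) -> List[str]:
--     return [x * i for x in list(string.ascii_letters)]
--
-- def _str_sequence(length: int) -> List[str]:
--     n_pool = len(_letter_pool(1))
--     result = []
--     step = 1
--     while 0 < length:
--         if length // n_pool > 0:
--             len_ = n_pool
--         else:
--             len_ = length % n_pool
--         result.extend(_letter_pool(step)[:len_])
--         length -= len_
--         step += 1
--     return result
-- ===== SOURCE B (Python) =====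
-- import string
--
-- def _str_sequence(length: int):
--     letters = string.ascii_letters
--     return [letters[i % 52] * (i // 52 + 1) for i in range(length)]
-- ===== Notes on version B (the rewrite author's own statement) =====
-- stated objective: simpler
-- what changed: Replaces A's block-by-block while-loop (step counter, per-block length via //,% and slices of a regenerated 52-element pool) with a single per-index comprehension computing each label directly as letters[i % 52] * (i // 52 + 1).
import Mathlib
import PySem

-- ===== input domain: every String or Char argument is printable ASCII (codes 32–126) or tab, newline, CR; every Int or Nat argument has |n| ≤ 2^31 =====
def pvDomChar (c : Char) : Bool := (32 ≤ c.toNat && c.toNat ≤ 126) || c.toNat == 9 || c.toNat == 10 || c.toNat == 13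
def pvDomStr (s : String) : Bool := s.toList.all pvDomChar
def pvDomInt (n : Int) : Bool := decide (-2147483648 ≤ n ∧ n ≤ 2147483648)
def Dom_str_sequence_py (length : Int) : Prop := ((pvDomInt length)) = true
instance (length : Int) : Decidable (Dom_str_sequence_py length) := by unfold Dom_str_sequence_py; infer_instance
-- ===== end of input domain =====

-- B replaces A's block-by-block while-loop over sliced letter pools with a single
-- per-index pass computing each label directly from divmod index arithmetic (objective: simpler).


-- ===== PORT A =====
-- string.ascii_letters as a list of characters
def pvLetters : List Char := "abcdefghijklmnopqrstuvwxyzABCDEFGHIJKLMNOPQRSTUVWXYZ".toList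

-- _letter_pool(i): [x * i for x in list(string.ascii_letters)]  (x * i is exact: '' for i ≤ 0)
def pvLetterPool (i : Int) : List String :=
  pvLetters.map (fun x => String.ofList (List.replicate i.toNat x))

-- n_pool = len(_letter_pool(1)), computed once in _str_sequence
def pvNPool : Int := ((pvLetterPool 1).length : Int)

-- the while-loop of _str_sequence, state (length, step)
def pvSeqLoop (length step : Int) : List String :=
  if _h : 0 < length then
    let len_ : Int := if 0 < PySem.Int.floordiv length pvNPool then pvNPool
                      else PySem.Int.mod length pvNPool
    (PySem.List.slice (pvLetterPool step) none (some len_)) ++ pvSeqLoop (length - len_) (step + 1)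
  else []
termination_by length.toNat
decreasing_by
  have hp : pvNPool = 52 := by decide
  rw [hp] at *
  rw [PySem.Int.floordiv_eq_ediv_of_pos (by omega : (0:Int) < 52),
      PySem.Int.mod_eq_emod_of_pos (by omega : (0:Int) < 52)]
  split <;> omega

def str_sequence_py (length : Int) : List String := pvSeqLoop length 1

-- ===== PORT B =====
-- letters[i % 52] * (i // 52 + 1)
def strSeqElem (i : Int) : String :=
  String.ofList (List.replicate ((PySem.Int.floordiv i 52).toNat + 1)
    (PySem.List.pyGetD pvLetters (PySem.Int.mod i 52) 'a'))

def str_sequence_py_alt (length : Int) : List String :=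
  (PySem.List.pyRange 0 length 1).map strSeqElem

-- ===== PRECONDITION & SPEC =====
def Spec_str_sequence_py (length : Int) (out : List String) : Prop := out = str_sequence_py_alt length
instance (length : Int) (out : List String) : Decidable (Spec_str_sequence_py length out) := by unfold Spec_str_sequence_py; infer_instance

-- ===== CLAIM (what is proved, stated in full; the proofs are below) =====
def Claim_equal_str_sequence_py : Prop := ∀ (length : Int), Dom_str_sequence_py length → Spec_str_sequence_py length (str_sequence_py length)

-- ===== LEMMAS AND PROOFS =====

lemma pvLetters_length : pvLetters.length = 52 := by decide

-- B's element at global index k + 52*(s-1) is s copies of letter k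
lemma strSeqElem_eq (s : Int) (hs : 1 ≤ s) (k : Nat) (hk : k < 52) :
    strSeqElem ((k : Int) + 52 * (s - 1)) =
      String.ofList (List.replicate s.toNat (pvLetters[k]'(by rw [pvLetters_length]; exact hk))) := by
  have hdiv : PySem.Int.floordiv ((k : Int) + 52 * (s - 1)) 52 = s - 1 := by
    rw [PySem.Int.floordiv_eq_iff_of_pos (by omega : (0:Int) < 52)]
    constructor <;> nlinarith
  have hmod : PySem.Int.mod ((k : Int) + 52 * (s - 1)) 52 = (k : Int) := by
    have h := PySem.Int.floordiv_mul_add_mod ((k : Int) + 52 * (s - 1)) 52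
    rw [hdiv] at h; nlinarith
  have hlen : k < pvLetters.length := by rw [pvLetters_length]; exact hk
  rw [strSeqElem, hdiv, hmod, PySem.List.pyGetD_natCast,
      List.getD_eq_getElem pvLetters 'a' hlen]
  congr 2
  omega

-- one block of ≤ 52 labels, starting at global index 52*(s-1), is a prefix of the pool
lemma block_eq (s : Int) (hs : 1 ≤ s) (t : Int) (h0 : 0 ≤ t) (h52 : t ≤ 52) :
    (PySem.List.pyRange 0 t 1).map (fun i => strSeqElem (i + 52 * (s - 1))) =
      (pvLetterPool s).take t.toNat := by
  rw [PySem.List.pyRange_one]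
  apply List.ext_getElem
  · simp [pvLetterPool, pvLetters_length]; omega
  · intro k h1 h2
    simp only [List.getElem_map, List.getElem_range, List.getElem_take]
    simp only [List.length_map, List.length_range] at h1
    have hk : k < 52 := by omega
    rw [zero_add, strSeqElem_eq s hs k hk]
    simp [pvLetterPool]

lemma loop_eq (n : Nat) : ∀ (r s : Int), r.toNat = n → 1 ≤ s →
    pvSeqLoop r s = (PySem.List.pyRange 0 r 1).map (fun i => strSeqElem (i + 52 * (s - 1))) := by
  induction n using Nat.strong_induction_on with
  | _ n ih =>
    intro r s hn hs
    rw [pvSeqLoop]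
    have hp : pvNPool = 52 := by decide
    split
    · rename_i hr
      rw [hp]
      have hdiv : PySem.Int.floordiv r 52 = r / 52 :=
        PySem.Int.floordiv_eq_ediv_of_pos (by omega)
      have hmod : PySem.Int.mod r 52 = r % 52 :=
        PySem.Int.mod_eq_emod_of_pos (by omega)
      by_cases hbig : 52 ≤ r
      · have hcond : 0 < PySem.Int.floordiv r 52 := by rw [hdiv]; omega
        simp only [hcond, if_pos]
        rw [PySem.List.slice_to _ (by omega : (0:Int) ≤ 52)]
        rw [PySem.List.pyRange_one_append 0 52 r (by omega) (by omega), List.map_append]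
        rw [ih (r - 52).toNat (by omega) (r - 52) (s + 1) rfl (by omega)]
        congr 1
        · rw [← block_eq s hs 52 (by omega) (by omega)]
        · rw [PySem.List.pyRange_one, PySem.List.pyRange_one]
          simp only [List.map_map, Int.sub_zero]
          apply List.map_congr_left
          intro x _
          simp only [Function.comp_apply]
          congr 1
          ring
      · have hcond : ¬ 0 < PySem.Int.floordiv r 52 := by rw [hdiv]; omega
        simp only [hcond, if_false]
        have hmr : PySem.Int.mod r 52 = r := by rw [hmod]; omega
        rw [hmr]
        rw [PySem.List.slice_to _ (by omega : (0:Int) ≤ r)]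
        rw [← block_eq s hs r (by omega) (by omega)]
        have h0 : r - r = 0 := by omega
        rw [h0]
        rw [ih 0 (by omega) 0 (s + 1) rfl (by omega)]
        simp [PySem.List.pyRange_one_eq_nil]
    · rename_i hr
      rw [PySem.List.pyRange_one_eq_nil (by omega)]
      rfl

-- ===== VERDICT (by name: the statement is the Claim_ definition above) =====
theorem str_sequence_py_spec : Claim_equal_str_sequence_py := by
  intro length _
  unfold Spec_str_sequence_py str_sequence_py str_sequence_py_alt
  rw [loop_eq length.toNat length 1 rfl (by omega)]
  simp
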